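-- pv_equiv track=rewrite | github.com/lifecycles1/competitive-programming | codesignal/arcade/2.core/9.well of integration/13.threeSplit.py | threeSplit
-- ===== SOURCE A (Python) =====
-- def threeSplit(a):
--     summ = 0
--     for i in a:
--         summ += i
--     find = summ // 3
--
--     cut1 = 0
--     total = 0
--     summ = 0
--     for i in range(len(a)-1):
--         x = a[i]
--         summ += x
--         total += cut1 if summ == 2*find else 0
--         cut1 += summ == find
--     return total
-- ===== SOURCE B (Python) =====
-- def threeSplit(a):
--     summ = sum(a)
--     find = summ // 3
--     prefs = []
--     s = 0
--     for x in a[:len(a) - 1]: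
--         s += x
--         prefs.append(s)
--     total = 0
--     count2 = 0
--     for p in reversed(prefs):
--         if p == find:
--             total += count2
--         if p == 2 * find:
--             count2 += 1
--     return total
-- ===== Notes on version B (the rewrite author's own statement) =====
-- stated objective: alternative
-- what changed: B first materialises the prefix-sum list over the cut positions, then scans it right-to-left counting second cuts (prefix == 2*find) still ahead of each first cut (prefix == find), instead of A's single left-to-right pass counting first cuts behind each second cut.
import Mathlib
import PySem

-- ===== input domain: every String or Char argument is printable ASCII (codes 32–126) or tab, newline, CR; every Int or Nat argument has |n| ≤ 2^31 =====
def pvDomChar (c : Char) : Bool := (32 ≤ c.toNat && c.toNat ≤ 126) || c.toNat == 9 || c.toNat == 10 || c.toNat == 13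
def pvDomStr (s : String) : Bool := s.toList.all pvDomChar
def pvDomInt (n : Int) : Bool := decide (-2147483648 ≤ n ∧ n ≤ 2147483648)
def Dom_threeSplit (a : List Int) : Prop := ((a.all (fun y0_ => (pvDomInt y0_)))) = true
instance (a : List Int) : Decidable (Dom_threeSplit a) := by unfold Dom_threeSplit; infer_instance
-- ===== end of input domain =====

-- B builds the prefix-sum list over the cut positions and scans it right-to-left,
-- counting second cuts ahead of each first cut instead of A's left-to-right pass;
-- alternative decomposition, same O(n) cost.


-- ===== PORT A =====
-- A's loop body: given (cut1, total, summ) and the element a[i], update in A's order.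
def stepA (find : Int) (st : Int × Int × Int) (x : Int) : Int × Int × Int :=
  let summ := st.2.2 + x
  let total := st.2.1 + (if summ = 2 * find then st.1 else 0)
  let cut1 := st.1 + (if summ = find then 1 else 0)
  (cut1, total, summ)

def threeSplit (a : List Int) : Int :=
  let summ := a.foldl (fun s i => s + i) 0
  let find := PySem.Int.floordiv summ 3
  let st := (PySem.List.pyRange 0 ((a.length : Int) - 1) 1).foldl
    (fun st i => stepA find st (PySem.List.pyGetD a i 0)) (0, 0, 0)
  st.2.1

-- ===== PORT B =====
-- prefix-list building step: state (running sum, prefs)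
def prefStep (st : Int × List Int) (x : Int) : Int × List Int :=
  (st.1 + x, st.2 ++ [st.1 + x])

-- B's right-to-left scan step: state (total, count2)
def stepB (find : Int) (st : Int × Int) (p : Int) : Int × Int :=
  (st.1 + (if p = find then st.2 else 0), st.2 + (if p = 2 * find then 1 else 0))

def threeSplit_alt (a : List Int) : Int :=
  let summ := a.foldl (fun s i => s + i) 0
  let find := PySem.Int.floordiv summ 3
  let prefs := (PySem.List.slice a none (some ((a.length : Int) - 1))).foldl prefStep (0, [])
  let res := prefs.2.reverse.foldl (stepB find) (0, 0)
  res.1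

-- ===== PRECONDITION & SPEC =====
def Spec_threeSplit (a : List Int) (out : Int) : Prop := out = threeSplit_alt a
instance (a : List Int) (out : Int) : Decidable (Spec_threeSplit a out) := by unfold Spec_threeSplit; infer_instance

-- ===== CLAIM (what is proved, stated in full; the proofs are below) =====
def Claim_equal_threeSplit : Prop := ∀ (a : List Int), Dom_threeSplit a → Spec_threeSplit a (threeSplit a)

-- ===== LEMMAS AND PROOFS =====

-- successive prefix sums of xs starting from s
def prefixes (s : Int) : List Int → List Int
  | [] => []
  | x :: xs => (s + x) :: prefixes (s + x) xs

-- A's pass abstracted over the prefix-sum list: state (cut1, total)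
def fA (find c t : Int) : List Int → Int × Int
  | [] => (c, t)
  | p :: ps => fA find (c + (if p = find then 1 else 0)) (t + (if p = 2 * find then c else 0)) ps

-- B's pass abstracted: result (count2, total) of scanning ps right-to-left
def fB (find : Int) : List Int → Int × Int
  | [] => (0, 0)
  | p :: ps =>
    let r := fB find ps
    (r.1 + (if p = 2 * find then 1 else 0), r.2 + (if p = find then r.1 else 0))

theorem slice_dropLast (a : List Int) :
    PySem.List.slice a none (some ((a.length : Int) - 1)) = a.dropLast := by
  cases a with
  | nil => simp [PySem.List.slice_to_neg_one]
  | cons x xs =>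
    have h : ((x :: xs).length : Int) - 1 = ((xs.length : Nat) : Int) := by
      simp
    rw [h, PySem.List.slice_to_natCast]
    simp [List.dropLast_eq_take]

theorem foldlA_eq_dropLast (a : List Int) (find : Int) (init : Int × Int × Int) :
    (PySem.List.pyRange 0 ((a.length : Int) - 1) 1).foldl
      (fun st i => stepA find st (PySem.List.pyGetD a i 0)) init
    = a.dropLast.foldl (stepA find) init := by
  cases a with
  | nil =>
    rw [show ((([]:List Int).length : Int) - 1) = -1 by simp,
      PySem.List.pyRange_one_eq_nil (by norm_num : (-1:Int) ≤ 0)]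
    simp
  | cons x xs =>
    set l := (x :: xs).dropLast with hl
    have hlen : ((x :: xs).length : Int) - 1 = (l.length : Int) := by
      simp [hl]
    rw [hlen]
    rw [PySem.List.foldl_congr_mem (g := fun st i => stepA find st (PySem.List.pyGetD l i 0))]
    · simpa using PySem.List.foldl_pyRange_pyGetD (xs := l) (a := 0) (d := 0)
        (f := stepA find) (init := init) (le_refl 0)
    · intro acc i hi
      rw [PySem.List.mem_pyRange_one] at hi
      have h1 : PySem.List.pyGetD (x :: xs) i 0 = (x :: xs)[i.toNat] := by
        refine PySem.List.pyGetD_eq_getElem _ 0 hi.1 ?_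
        have : (l.length : Int) ≤ ((x :: xs).length : Int) := by
          simp [hl]
        omega
      have h2 : PySem.List.pyGetD l i 0 = l[i.toNat]'(by omega) :=
        PySem.List.pyGetD_eq_getElem l 0 hi.1 hi.2
      have h3 : l[i.toNat]'(by omega) = (x :: xs)[i.toNat]'(by
          have : l.length ≤ (x :: xs).length := by simp [hl]
          omega) := by
        simp [hl, List.getElem_dropLast]
      rw [h1, h2, h3]

theorem foldl_stepA_prefixes (find : Int) (xs : List Int) (c t s : Int) :
    (xs.foldl (stepA find) (c, t, s)).2.1 = (fA find c t (prefixes s xs)).2 := by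
  induction xs generalizing c t s with
  | nil => simp [prefixes, fA]
  | cons x xs ih => simp [List.foldl_cons, stepA, prefixes, fA, ih]

theorem prefStep_prefixes (xs : List Int) (s : Int) (acc : List Int) :
    (xs.foldl prefStep (s, acc)).2 = acc ++ prefixes s xs := by
  induction xs generalizing s acc with
  | nil => simp [prefixes]
  | cons x xs ih => simp [List.foldl_cons, prefStep, prefixes, ih]

theorem fA_eq_fB (find : Int) (P : List Int) (c t : Int) :
    (fA find c t P).2 = t + (fB find P).2 + c * (fB find P).1 := by
  induction P generalizing c t with
  | nil => simp [fA, fB]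
  | cons p ps ih =>
    simp only [fA, fB, ih]
    split_ifs <;> ring

theorem foldl_stepB_reverse (find : Int) (P : List Int) :
    P.reverse.foldl (stepB find) (0, 0) = ((fB find P).2, (fB find P).1) := by
  induction P with
  | nil => simp [fB]
  | cons p ps ih =>
    simp only [List.reverse_cons, List.foldl_append, ih, List.foldl_cons, List.foldl_nil]
    simp [stepB, fB]

-- ===== VERDICT (by name: the statement is the Claim_ definition above) =====
theorem threeSplit_spec : Claim_equal_threeSplit := by
  intro a _
  unfold Spec_threeSplit threeSplit threeSplit_alt
  simp only [foldlA_eq_dropLast, slice_dropLast]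
  set find := PySem.Int.floordiv (a.foldl (fun s i => s + i) 0) 3
  rw [foldl_stepA_prefixes, prefStep_prefixes]
  simp only [List.nil_append]
  rw [fA_eq_fB, foldl_stepB_reverse]
  ring
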